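-- pv_equiv track=rewrite | github.com/pablobfuentes/SEA-Webb | src/structural_tree_app/services/document_service.py | _join_normalized_pages
-- ===== SOURCE A (Python) =====
-- import unicodedata
--
-- def _normalize_text(text: str) -> str:
--     t = unicodedata.normalize("NFKC", text)
--     t = t.replace("\r\n", "\n").replace("\r", "\n")
--     return t.strip()
--
-- def _join_normalized_pages(pages: list[tuple[int, str]]) -> tuple[str, list[tuple[int, int, int]]]:
--     """Build normalized full text and char spans (start, end_exclusive, page_1based) per page."""
--     parts: list[str] = []
--     spans: list[tuple[int, int, int]] = []
--     offset = 0
--     for i, (page_num, raw) in enumerate(pages):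
--         n = _normalize_text(raw)
--         if i > 0:
--             parts.append("\n\n")
--             offset += 2
--         start = offset
--         parts.append(n)
--         offset += len(n)
--         spans.append((start, offset, page_num))
--     return "".join(parts), spans
-- ===== SOURCE B (Python) =====
-- import unicodedata
--
-- def _normalize_text(text: str) -> str:
--     t = unicodedata.normalize("NFKC", text)
--     t = t.replace("\r\n", "\n").replace("\r", "\n")
--     return t.strip()
--
-- def _page_spans(normed, offset):
--     """Spans for (page_num, normalized_text) pairs starting at char offset."""
--     if not normed:
--         return []
--     page_num, n = normed[0]
--     end = offset + len(n)
--     return [(offset, end, page_num)] + _page_spans(normed[1:], end + 2)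
--
-- def _join_normalized_pages(pages: list[tuple[int, str]]) -> tuple[str, list[tuple[int, int, int]]]:
--     """Build normalized full text and char spans (start, end_exclusive, page_1based) per page."""
--     normed = [(page_num, _normalize_text(raw)) for page_num, raw in pages]
--     return "\n\n".join(n for _, n in normed), _page_spans(normed, 0)
-- ===== Notes on version B (the rewrite author's own statement) =====
-- stated objective: simpler
-- what changed: B separates the interleaved loop into two phases: a comprehension that normalizes every page plus a '\n\n'.join for the full text (dropping the i>0 separator-append branch and enumerate), and a separate span pass that advances the offset by len(n)+2 per page.
import Mathlib
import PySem

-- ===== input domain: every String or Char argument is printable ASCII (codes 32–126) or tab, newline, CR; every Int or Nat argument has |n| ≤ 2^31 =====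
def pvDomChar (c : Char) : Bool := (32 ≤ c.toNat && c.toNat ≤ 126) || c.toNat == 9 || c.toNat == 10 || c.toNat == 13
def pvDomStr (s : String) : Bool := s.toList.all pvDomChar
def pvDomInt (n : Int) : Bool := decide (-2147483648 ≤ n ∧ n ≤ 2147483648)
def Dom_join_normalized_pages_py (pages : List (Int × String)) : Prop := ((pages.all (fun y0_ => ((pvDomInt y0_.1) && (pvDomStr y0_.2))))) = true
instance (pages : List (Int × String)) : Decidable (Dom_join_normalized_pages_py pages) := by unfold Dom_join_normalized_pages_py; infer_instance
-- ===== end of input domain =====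

-- B separates text-building (normalize-all + '\n\n'.join) from span computation (simpler decomposition, same cost).


-- ===== PORT A =====
-- _normalize_text: unicodedata.normalize("NFKC", ·) is the identity on the ASCII domain
-- (Dom_ admits only code points 9/10/13/32–126, which NFKC leaves unchanged), so it is
-- ported as the identity step; the replaces and strip are exact via PySem.Str.
def pvNormalizeText (text : String) : String :=
  PySem.Str.strip (PySem.Str.replace (PySem.Str.replace text "\r\n" "\n") "\r" "\n")

-- the body of A's `for i, (page_num, raw) in enumerate(pages)` loop
def pvStepA (st : List String × List (Int × Int × Int) × Int) (ip : Int × Int × String) :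
    List String × List (Int × Int × Int) × Int :=
  let n := pvNormalizeText ip.2.2
  let po := if ip.1 > 0 then (st.1 ++ ["\n\n"], st.2.2 + 2) else (st.1, st.2.2)
  let start := po.2
  let offset := po.2 + (PySem.Str.len n : Int)
  (po.1 ++ [n], st.2.1 ++ [(start, offset, ip.2.1)], offset)

def join_normalized_pages_py (pages : List (Int × String)) : String × (List (Int × Int × Int)) :=
  let res := (PySem.List.enumerate pages 0).foldl pvStepA ([], [], 0)
  (PySem.Str.join "" res.1, res.2.1)

-- ===== PORT B =====
-- the body of B's span loop over the normalized pairs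
def pvStepB (st : List (Int × Int × Int) × Int) (pn : Int × String) :
    List (Int × Int × Int) × Int :=
  let endo := st.2 + (PySem.Str.len pn.2 : Int)
  (st.1 ++ [(st.2, endo, pn.1)], endo + 2)

def join_normalized_pages_py_alt (pages : List (Int × String)) : String × (List (Int × Int × Int)) :=
  let normed := pages.map (fun p => (p.1, pvNormalizeText p.2))
  let res := normed.foldl pvStepB ([], 0)
  (PySem.Str.join "\n\n" (normed.map (·.2)), res.1)

-- ===== PRECONDITION & SPEC =====
def Spec_join_normalized_pages_py (pages : List (Int × String)) (out : String × (List (Int × Int × Int))) : Prop := out = join_normalized_pages_py_alt pages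
instance (pages : List (Int × String)) (out : String × (List (Int × Int × Int))) : Decidable (Spec_join_normalized_pages_py pages out) := by unfold Spec_join_normalized_pages_py; infer_instance

-- ===== CLAIM (what is proved, stated in full; the proofs are below) =====
def Claim_equal_join_normalized_pages_py : Prop := ∀ (pages : List (Int × String)), Dom_join_normalized_pages_py pages → Spec_join_normalized_pages_py pages (join_normalized_pages_py pages)

-- ===== LEMMAS AND PROOFS =====

-- recursive characterisation of the span list built from offset o over normalized pairs
def pvSpansR : List (Int × String) → Int → List (Int × Int × Int)
  | [], _ => []
  | pn :: r, o => (o, o + (PySem.Str.len pn.2 : Int), pn.1) :: pvSpansR r (o + (PySem.Str.len pn.2 : Int) + 2)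

-- final offset of A's loop over a tail (each element preceded by a separator)
def pvOffA : List (Int × String) → Int → Int
  | [], o => o
  | pn :: r, o => pvOffA r (o + 2 + (PySem.Str.len (pvNormalizeText pn.2) : Int))

lemma pvFoldB (l : List (Int × String)) (acc : List (Int × Int × Int)) (o : Int) :
    (l.foldl pvStepB (acc, o)).1 = acc ++ pvSpansR l o := by
  induction l generalizing acc o with
  | nil => simp [pvSpansR]
  | cons pn r ih =>
    rw [List.foldl_cons]
    show (List.foldl pvStepB (acc ++ [(o, o + (PySem.Str.len pn.2 : Int), pn.1)],
      o + (PySem.Str.len pn.2 : Int) + 2) r).1 = _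
    rw [ih, pvSpansR]
    simp

lemma pvFoldA (l : List (Int × String)) (s : Int) (hs : 0 < s)
    (parts : List String) (spans : List (Int × Int × Int)) (o : Int) :
    (PySem.List.enumerate l s).foldl pvStepA (parts, spans, o)
    = (parts ++ l.flatMap (fun p => ["\n\n", pvNormalizeText p.2]),
       spans ++ pvSpansR (l.map (fun p => (p.1, pvNormalizeText p.2))) (o + 2),
       pvOffA l o) := by
  induction l generalizing s parts spans o with
  | nil => simp [pvSpansR, pvOffA, PySem.List.enumerate_nil]
  | cons pn r ih =>
    rw [PySem.List.enumerate_cons, List.foldl_cons]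
    show (PySem.List.enumerate r (s + 1)).foldl pvStepA (pvStepA (parts, spans, o) (s, pn)) = _
    rw [show pvStepA (parts, spans, o) (s, pn)
        = (parts ++ ["\n\n"] ++ [pvNormalizeText pn.2],
           spans ++ [(o + 2, o + 2 + (PySem.Str.len (pvNormalizeText pn.2) : Int), pn.1)],
           o + 2 + (PySem.Str.len (pvNormalizeText pn.2) : Int)) by
      unfold pvStepA
      simp only [gt_iff_lt, if_pos hs]]
    rw [ih (s + 1) (by omega)]
    simp only [pvSpansR, pvOffA, List.flatMap_cons, List.map_cons, List.append_assoc,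
      List.cons_append, List.nil_append]

lemma pvMapFlat (r : List (Int × String)) :
    (r.flatMap (fun p => ["\n\n", pvNormalizeText p.2])).map String.toList
    = (r.map (fun p => (pvNormalizeText p.2).toList)).flatMap
        (fun x => ["\n\n".toList, x]) := by
  induction r with
  | nil => rfl
  | cons q t ih =>
    simp only [List.flatMap_cons, List.map_cons, ih, List.nil_append, List.cons_append]

-- '' joining [a, sep, b₁, sep, b₂, …] equals sep joining [a, b₁, b₂, …]
lemma pvJoinChars (sep a : List Char) (l : List (List Char)) :
    PySem.Chars.join [] (a :: l.flatMap (fun x => [sep, x]))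
    = PySem.Chars.join sep (a :: l) := by
  induction l generalizing a with
  | nil => rfl
  | cons b r ih =>
    rw [List.flatMap_cons]
    show PySem.Chars.join [] (a :: sep :: b :: r.flatMap (fun x => [sep, x])) = _
    rw [PySem.Chars.join_cons_cons, PySem.Chars.join_cons_cons, ih b,
        PySem.Chars.join_cons_cons]
    simp

-- ===== VERDICT (by name: the statement is the Claim_ definition above) =====
theorem join_normalized_pages_py_spec : Claim_equal_join_normalized_pages_py := by
  intro pages _
  unfold Spec_join_normalized_pages_py
  cases pages with
  | nil => rfl
  | cons pn rest =>
    have hA : join_normalized_pages_py (pn :: rest)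
        = (PySem.Str.join ""
            ([pvNormalizeText pn.2] ++ rest.flatMap (fun p => ["\n\n", pvNormalizeText p.2])),
           [(0, (PySem.Str.len (pvNormalizeText pn.2) : Int), pn.1)] ++
             pvSpansR (rest.map (fun p => (p.1, pvNormalizeText p.2)))
               ((PySem.Str.len (pvNormalizeText pn.2) : Int) + 2)) := by
      show (PySem.Str.join "" (((PySem.List.enumerate (pn :: rest) 0).foldl pvStepA ([], [], 0)).1),
            ((PySem.List.enumerate (pn :: rest) 0).foldl pvStepA ([], [], 0)).2.1) = _
      rw [PySem.List.enumerate_cons, List.foldl_cons,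
          show pvStepA ([], [], 0) (0, pn)
            = ([pvNormalizeText pn.2],
               [(0, (PySem.Str.len (pvNormalizeText pn.2) : Int), pn.1)],
               (PySem.Str.len (pvNormalizeText pn.2) : Int)) by
            unfold pvStepA
            simp only [gt_iff_lt, lt_self_iff_false, if_false, zero_add, List.nil_append],
          pvFoldA rest (0 + 1) (by omega)]
    have hB : join_normalized_pages_py_alt (pn :: rest)
        = (PySem.Str.join "\n\n"
            (pvNormalizeText pn.2 :: (rest.map (fun p => (p.1, pvNormalizeText p.2))).map (·.2)),
           [(0, (PySem.Str.len (pvNormalizeText pn.2) : Int), pn.1)] ++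
             pvSpansR (rest.map (fun p => (p.1, pvNormalizeText p.2)))
               ((PySem.Str.len (pvNormalizeText pn.2) : Int) + 2)) := by
      show (PySem.Str.join "\n\n" (((pn :: rest).map (fun p => (p.1, pvNormalizeText p.2))).map (·.2)),
            (((pn :: rest).map (fun p => (p.1, pvNormalizeText p.2))).foldl pvStepB ([], 0)).1) = _
      rw [List.map_cons, List.foldl_cons,
          show pvStepB ([], 0) (pn.1, pvNormalizeText pn.2)
            = ([(0, (PySem.Str.len (pvNormalizeText pn.2) : Int), pn.1)],
               (PySem.Str.len (pvNormalizeText pn.2) : Int) + 2) by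
            unfold pvStepB
            simp only [zero_add, List.nil_append],
          pvFoldB, List.map_cons]
    rw [hA, hB]
    refine Prod.ext ?_ rfl
    -- the joined strings agree
    apply String.toList_inj.mp
    simp only [PySem.Str.toList_join, List.map_cons, List.map_append, List.map_map,
      List.map_nil, List.cons_append, List.nil_append]
    rw [pvMapFlat, show ("" : String).toList = [] from rfl,
        pvJoinChars "\n\n".toList ((pvNormalizeText pn.2).toList)
          (rest.map (fun p => (pvNormalizeText p.2).toList))]
    rfl
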